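-- pv_equiv track=rewrite | github.com/pypi-data/pypi-mirror-31 | packages/revscoring/revscoring-2.2.1.tar.gz/revscoring-2.2.1/revscoring/datasources/meta/frequencies.py | process
-- ===== SOURCE A (Python) =====
-- def process(old_ft, new_tf):
--     old_ft = old_ft or {}
--
--     delta_table = {}
--     for item, new_count in new_tf.items():
--         old_count = old_ft.get(item, 0)
--         if new_count != old_count:
--             delta_table[item] = new_count - old_count
--
--     for item in old_ft.keys() - new_tf.keys():
--         delta_table[item] = old_ft[item] * -1
--
--     return delta_table
-- ===== SOURCE B (Python) =====
-- def process(old_ft, new_tf):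
--     result = dict(new_tf)
--     for item, old_count in (old_ft or {}).items():
--         result[item] = result.get(item, 0) - old_count
--     return {item: delta for item, delta in result.items()
--             if delta != 0 or item not in new_tf}
-- ===== Notes on version B (the rewrite author's own statement) =====
-- stated objective: alternative
-- what changed: Instead of A's build-up of a delta dict by two passes (new items with nonzero delta, then the old-minus-new key set), B starts from a copy of new_tf, subtracts every old count into it in one mutation loop, and finally filters the merged table with a dict comprehension keeping entries with delta != 0 or an old-only key.
import Mathlib
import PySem

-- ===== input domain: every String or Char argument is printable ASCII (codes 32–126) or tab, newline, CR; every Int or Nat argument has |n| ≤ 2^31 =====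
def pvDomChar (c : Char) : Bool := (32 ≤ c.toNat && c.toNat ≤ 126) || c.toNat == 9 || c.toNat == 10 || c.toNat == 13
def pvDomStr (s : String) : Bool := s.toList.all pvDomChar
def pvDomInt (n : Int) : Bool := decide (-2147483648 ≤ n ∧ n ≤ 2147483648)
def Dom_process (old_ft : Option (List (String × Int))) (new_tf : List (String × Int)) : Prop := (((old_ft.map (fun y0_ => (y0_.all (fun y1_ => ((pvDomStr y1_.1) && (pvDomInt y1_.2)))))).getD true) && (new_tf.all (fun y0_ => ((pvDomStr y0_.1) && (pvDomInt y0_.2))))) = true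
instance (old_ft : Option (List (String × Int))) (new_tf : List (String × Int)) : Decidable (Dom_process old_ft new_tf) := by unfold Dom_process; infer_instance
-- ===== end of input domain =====

-- B drops A's two-pass construction of the delta dict and instead subtracts the old counts into a copy
-- of new_tf, then filters the merged table once (same cost, different decomposition); equal return value
-- proved below. Dicts are association lists; result dicts are compared order-insensitively, so both ports
-- realize Python's unspecified set-iteration order (A's `keys() - keys()`) as first-insertion order.

-- ===== PORT A =====
-- A's line `for item in old_ft.keys() - new_tf.keys()` iterates a Python set difference; its order is
-- realized as old_ft's key order (PySem.Set.diff keeps the left operand's order). `old_ft[item]` is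
-- ported as getD _ _ 0, exact because item is drawn from old_ft's keys.
def process (old_ft : Option (List (String × Int))) (new_tf : List (String × Int)) : List (String × Int) :=
  let oldD : PySem.Dict String Int :=        -- old_ft = old_ft or {}
    match old_ft with
    | none => PySem.Dict.empty
    | some l => PySem.Dict.ofList l
  let newD : PySem.Dict String Int := PySem.Dict.ofList new_tf
  let d1 : PySem.Dict String Int :=          -- for item, new_count in new_tf.items(): ...
    newD.items.foldl (fun acc p =>
      let old_count := oldD.getD p.1 0
      if p.2 ≠ old_count then acc.insert p.1 (p.2 - old_count) else acc) PySem.Dict.empty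
  let d2 : PySem.Dict String Int :=          -- for item in old_ft.keys() - new_tf.keys(): ...
    (PySem.Set.diff oldD.keys newD.keys).foldl
      (fun acc k => acc.insert k (oldD.getD k 0 * -1)) d1
  d2.items

-- ===== PORT B =====
-- `result = dict(new_tf)` copies the parameter; in Lean both are the same immutable Dict newD.
-- The final dict comprehension re-inserts items whose keys are distinct (result's keys are unique),
-- so its dict is EXACTLY the filtered items list — ported as List.filter.
def process_alt (old_ft : Option (List (String × Int))) (new_tf : List (String × Int)) : List (String × Int) :=
  let newD : PySem.Dict String Int := PySem.Dict.ofList new_tf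
  let oldItems : List (String × Int) :=      -- (old_ft or {}).items()
    (match old_ft with
     | none => PySem.Dict.empty
     | some l => PySem.Dict.ofList l).items
  let result : PySem.Dict String Int :=      -- for item, old_count in ...: result[item] = result.get(item, 0) - old_count
    oldItems.foldl (fun acc p => acc.insert p.1 (acc.getD p.1 0 - p.2)) newD
  result.items.filter (fun p => decide (p.2 ≠ 0) || !(newD.contains p.1))

-- ===== PRECONDITION & SPEC =====
def Spec_process (old_ft : Option (List (String × Int))) (new_tf : List (String × Int)) (out : List (String × Int)) : Prop := out = process_alt old_ft new_tf
instance (old_ft : Option (List (String × Int))) (new_tf : List (String × Int)) (out : List (String × Int)) : Decidable (Spec_process old_ft new_tf out) := by unfold Spec_process; infer_instance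

-- ===== CLAIM (what is proved, stated in full; the proofs are below) =====
def Claim_equal_process : Prop := ∀ (old_ft : Option (List (String × Int))) (new_tf : List (String × Int)), Dom_process old_ft new_tf → Spec_process old_ft new_tf (process old_ft new_tf)

-- ===== LEMMAS AND PROOFS =====

-- A's first loop: an insert-if loop over pairs with distinct keys, all fresh for the accumulator,
-- appends the filtered, delta-mapped pairs.
theorem foldA (oldD : PySem.Dict String Int) (l : List (String × Int))
    (d : PySem.Dict String Int)
    (hfresh : ∀ p ∈ l, d.contains p.1 = false) (hl : (l.map Prod.fst).Nodup) :
    (l.foldl (fun acc p =>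
        if p.2 ≠ oldD.getD p.1 0 then acc.insert p.1 (p.2 - oldD.getD p.1 0) else acc) d).items
      = d.items ++ (l.filter (fun p => decide (p.2 ≠ oldD.getD p.1 0))).map
          (fun p => (p.1, p.2 - oldD.getD p.1 0)) := by
  induction l generalizing d with
  | nil => simp
  | cons p t ih =>
    have hp1 : p.1 ∉ t.map Prod.fst := (List.nodup_cons.mp (by simpa using hl)).1
    have ht : (t.map Prod.fst).Nodup := (List.nodup_cons.mp (by simpa using hl)).2
    simp only [List.foldl_cons]
    by_cases hc : p.2 = oldD.getD p.1 0
    · rw [if_neg (by simpa using hc), ih d (fun q hq => hfresh q (List.mem_cons_of_mem _ hq)) ht,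
        List.filter_cons_of_neg (by simpa using hc)]
    · rw [if_pos (by simpa using hc)]
      rw [ih (d.insert p.1 (p.2 - oldD.getD p.1 0))
          (fun q hq => by
            rw [PySem.Dict.contains_insert]
            have : q.1 ≠ p.1 := fun h => hp1 (h ▸ List.mem_map_of_mem hq)
            simp [this, hfresh q (List.mem_cons_of_mem _ hq)]) ht]
      rw [PySem.Dict.items_insert_of_not_contains d _ (hfresh p (List.mem_cons_self ..)),
        List.filter_cons_of_pos (by simpa using hc)]
      simp

-- B's loop: subtracting each old pair into the table rewrites existing entries in place and appends
-- negated old-only pairs; the lookup of the remaining suffix is first-match (Dict.mk, = Python dict built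
-- from the pairs).
theorem foldB (l : List (String × Int)) (d : PySem.Dict String Int)
    (hl : (l.map Prod.fst).Nodup) (hd : d.keys.Nodup) :
    (l.foldl (fun acc p => acc.insert p.1 (acc.getD p.1 0 - p.2)) d).items
      = d.items.map (fun q => (q.1, q.2 - (PySem.Dict.mk l).getD q.1 0))
        ++ (l.filter (fun p => !(d.contains p.1))).map (fun p => (p.1, -p.2)) := by
  induction l generalizing d with
  | nil =>
    have h0 : ∀ k : String, (PySem.Dict.mk ([] : List (String × Int))).getD k 0 = 0 := fun _ => rfl
    simp [h0]
  | cons p t ih =>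
    have hp1 : p.1 ∉ t.map Prod.fst := (List.nodup_cons.mp (by simpa using hl)).1
    have ht : (t.map Prod.fst).Nodup := (List.nodup_cons.mp (by simpa using hl)).2
    have htlk : (PySem.Dict.mk t).getD p.1 0 = 0 := by
      rw [PySem.Dict.getD_eq_get?_getD,
        (PySem.Dict.get?_eq_none_iff_not_mem_keys (PySem.Dict.mk t) p.1).mpr (by simpa using hp1)]
      rfl
    have hlk : ∀ k : String, k ≠ p.1 →
        (PySem.Dict.mk ((p :: t) : List (String × Int))).getD k 0 = (PySem.Dict.mk t).getD k 0 := by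
      intro k hk
      rw [PySem.Dict.getD_eq_get?_getD, PySem.Dict.get?_mk_cons,
        if_neg (by simpa using hk.symm), ← PySem.Dict.getD_eq_get?_getD]
    have hlkp : (PySem.Dict.mk ((p :: t) : List (String × Int))).getD p.1 0 = p.2 := by
      rw [PySem.Dict.getD_eq_get?_getD, PySem.Dict.get?_mk_cons, if_pos (by simp)]; rfl
    simp only [List.foldl_cons]
    rw [ih (d.insert p.1 (d.getD p.1 0 - p.2)) ht (PySem.Dict.nodup_keys_insert d _ _ hd)]
    cases hc : d.contains p.1 with
    | true =>
      rw [PySem.Dict.items_insert_of_contains d _ hc, List.map_map,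
        List.filter_cons_of_neg (by simp [hc])]
      congr 1
      · apply List.map_congr_left
        intro q hq
        by_cases hqp : q.1 = p.1
        · have hv : q.2 = d.getD p.1 0 := by
            rw [← hqp]
            exact (PySem.Dict.getD_of_mem_items d (by simpa using hq) hd 0).symm
          simp [hqp, hlkp, htlk, hv]
        · simp [hqp, hlk q.1 hqp]
      · apply congrArg
        apply List.filter_congr
        intro q hq
        have : q.1 ≠ p.1 := fun h => hp1 (h ▸ List.mem_map_of_mem hq)
        rw [PySem.Dict.contains_insert]
        simp [this]
    | false =>
      rw [PySem.Dict.items_insert_of_not_contains d _ hc, List.map_append,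
        List.filter_cons_of_pos (by simp [hc]), PySem.Dict.getD_of_not_contains d 0 hc]
      have hkd : p.1 ∉ d.keys := fun h => by
        rw [(PySem.Dict.contains_iff_mem_keys d p.1).mpr h] at hc; cases hc
      rw [List.append_assoc]
      congr 1
      · apply List.map_congr_left
        intro q hq
        have : q.1 ≠ p.1 := fun h =>
          hkd (h ▸ List.mem_map_of_mem (f := Prod.fst) hq)
        rw [hlk q.1 this]
      · simp only [List.map, htlk]
        rw [show (0 : Int) - p.2 - 0 = -p.2 by ring]
        apply congrArg
        apply congrArg
        apply List.filter_congr
        intro q hq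
        have : q.1 ≠ p.1 := fun h => hp1 (h ▸ List.mem_map_of_mem hq)
        rw [PySem.Dict.contains_insert]
        simp [this]

-- Core: for any two dicts with unique keys, A's two passes and B's subtract-then-filter pass
-- produce the same items list.
theorem process_core (oldD newD : PySem.Dict String Int)
    (hno : oldD.keys.Nodup) (hnn : newD.keys.Nodup) :
    ((PySem.Set.diff oldD.keys newD.keys).foldl
        (fun acc k => acc.insert k (oldD.getD k 0 * -1))
        (newD.items.foldl (fun acc p =>
          if p.2 ≠ oldD.getD p.1 0 then acc.insert p.1 (p.2 - oldD.getD p.1 0) else acc)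
          PySem.Dict.empty)).items
    = (oldD.items.foldl (fun acc p => acc.insert p.1 (acc.getD p.1 0 - p.2)) newD).items.filter
        (fun p => decide (p.2 ≠ 0) || !(newD.contains p.1)) := by
  have hA1 := foldA oldD newD.items PySem.Dict.empty
    (fun p _ => PySem.Dict.contains_empty p.1) hnn
  rw [show PySem.Dict.empty.items = ([] : List (String × Int)) from rfl,
    List.nil_append] at hA1
  -- A's second loop inserts only keys fresh for d1 (d1's keys all come from newD)
  rw [PySem.Dict.items_foldl_insert_fresh (PySem.Set.diff oldD.keys newD.keys) (fun a => a)
      (fun k => oldD.getD k 0 * -1) _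
      (fun k hk => by
        have hknew : k ∉ newD.keys := ((PySem.Set.mem_diff _ _ k).mp hk).2
        rw [PySem.Dict.contains_eq_decide_mem_keys]
        simp only [PySem.Dict.keys, hA1, decide_eq_false_iff_not]
        intro hmem
        rcases List.mem_map.mp hmem with ⟨q, hq, hq1⟩
        rcases List.mem_map.mp hq with ⟨r, hr, rfl⟩
        have hk1 : r.1 = k := hq1
        exact hknew (hk1 ▸ List.mem_map_of_mem (f := Prod.fst) (List.mem_filter.mp hr).1))
      (by simpa using PySem.Set.nodup_diff oldD.keys newD.keys hno)]
  rw [hA1]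
  -- B's loop, then its filter
  have hmk : PySem.Dict.mk oldD.items = oldD := rfl
  rw [foldB oldD.items newD hno hnn, hmk, List.filter_append]
  congr 1
  · -- kept entries that come from new_tf: exactly A's first loop
    rw [List.filter_map]
    apply congrArg
    apply List.filter_congr
    intro q hq
    have hcq : newD.contains q.1 = true :=
      (PySem.Dict.contains_iff_mem_keys newD q.1).mpr (List.mem_map_of_mem (f := Prod.fst) hq)
    simp [Function.comp, hcq, sub_ne_zero]
  · -- old-only entries: A iterates the key-set difference, B filters the merged items
    rw [List.filter_map]
    have hkeep : (List.filter
        ((fun p => decide (p.2 ≠ 0) || !(newD.contains p.1)) ∘ fun p => (p.1, -p.2))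
        (oldD.items.filter (fun p => !(newD.contains p.1))))
        = oldD.items.filter (fun p => !(newD.contains p.1)) := by
      rw [List.filter_congr (q := fun _ => true)
        (fun q hq => by simp [Function.comp, (List.mem_filter.mp hq).2])]
      exact List.filter_true _
    rw [hkeep]
    have hdiff : PySem.Set.diff oldD.keys newD.keys
        = (oldD.items.filter (fun p => !(newD.contains p.1))).map Prod.fst := by
      show (oldD.items.map Prod.fst).filter (fun x => !(newD.keys.contains x)) = _
      rw [List.filter_map]
      apply congrArg
      apply List.filter_congr
      intro q _
      rw [PySem.Dict.contains_eq_decide_mem_keys]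
      by_cases h : q.1 ∈ newD.keys <;> simp [Function.comp, h]
    rw [hdiff, List.map_map]
    apply List.map_congr_left
    intro q hq
    have hv : oldD.getD q.1 0 = q.2 :=
      PySem.Dict.getD_of_mem_items oldD (by simpa using (List.mem_filter.mp hq).1) hno 0
    simp [Function.comp, hv]

-- ===== VERDICT (by name: the statement is the Claim_ definition above) =====
theorem process_spec : Claim_equal_process := by
  intro old_ft new_tf _
  unfold Spec_process process process_alt
  cases old_ft with
  | none =>
    exact process_core PySem.Dict.empty (PySem.Dict.ofList new_tf)
      PySem.Dict.nodup_keys_empty (PySem.Dict.nodup_keys_ofList new_tf)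
  | some l =>
    exact process_core (PySem.Dict.ofList l) (PySem.Dict.ofList new_tf)
      (PySem.Dict.nodup_keys_ofList l) (PySem.Dict.nodup_keys_ofList new_tf)
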